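-- pv_equiv track=rewrite | github.com/Nghia03092004/nghia03092004.github.io | project_euler/problem_488/solution.py | count_p_positions_two_heaps
-- ===== SOURCE A (Python) =====
-- def compute_grundy(max_h: int) -> list:
--     """Compute Grundy values G(0), G(1), ..., G(max_h) for unbalanced Nim."""
--     G = [0] * (max_h + 1)
--     for h in range(2, max_h + 1):
--         # From h, can move to positions ceil(h/2) .. h-1
--         low = (h + 1) // 2  # ceil(h/2)
--         high = h - 1
--         reachable = set()
--         for j in range(low, high + 1):
--             reachable.add(G[j])
--         # mex: smallest non-negative integer not in reachable
--         mex = 0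
--         while mex in reachable:
--             mex += 1
--         G[h] = mex
--     return G
--
-- def count_p_positions_two_heaps(max_h: int):
--     """Count P-positions (losing for current player) with two heaps, each 0..max_h."""
--     G = compute_grundy(max_h)
--     count = 0
--     for h1 in range(max_h + 1):
--         for h2 in range(max_h + 1):
--             if G[h1] ^ G[h2] == 0:
--                 count += 1
--     return count
-- ===== SOURCE B (Python) =====
-- def count_p_positions_two_heaps(max_h: int):
--     """Count P-positions (losing for current player) with two heaps, each 0..max_h."""
--     # Grundy value of unbalanced Nim has the closed form G(2k) = k, G(2k+1) = G(k):
--     # strip the trailing 1-bits of h, then halve.  Count equal-Grundy pairs as a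
--     # sum of squared frequencies instead of the quadratic double loop.
--     freq = {}
--     for h in range(max_h + 1):
--         x = h
--         while x % 2 == 1:
--             x //= 2
--         g = x // 2
--         freq[g] = freq.get(g, 0) + 1
--     return sum(c * c for c in freq.values())
-- ===== Notes on version B (the rewrite author's own statement) =====
-- stated objective: faster
-- what changed: Replaces A's O(max_h^2) work (rebuilding each reachable set to take a mex, then a quadratic double loop comparing Grundy values) by the closed form G(2k)=k, G(2k+1)=G(k) (strip trailing 1-bits, halve) computed per heap in O(log h), and counts equal-Grundy pairs as a sum of squared frequencies from one counting dict.
import Mathlib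
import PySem

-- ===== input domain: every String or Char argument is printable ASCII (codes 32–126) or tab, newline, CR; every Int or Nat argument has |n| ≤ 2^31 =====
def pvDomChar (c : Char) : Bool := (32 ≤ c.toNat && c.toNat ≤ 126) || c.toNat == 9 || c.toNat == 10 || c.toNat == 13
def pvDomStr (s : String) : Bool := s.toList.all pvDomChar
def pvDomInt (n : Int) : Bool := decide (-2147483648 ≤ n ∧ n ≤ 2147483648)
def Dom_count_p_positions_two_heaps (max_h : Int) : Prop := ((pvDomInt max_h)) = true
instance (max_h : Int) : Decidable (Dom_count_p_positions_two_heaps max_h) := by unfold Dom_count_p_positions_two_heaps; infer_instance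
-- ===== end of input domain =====

-- B replaces A's quadratic Grundy/mex recomputation and quadratic pair count by the
-- closed form G(2k)=k, G(2k+1)=G(k) and a sum of squared frequencies (asymptotically faster).
-- ===== PORT A =====
-- while-mex loop of compute_grundy: 'mex = 0; while mex in reachable: mex += 1';
-- fuel = reachable.length + 1 bounds the loop (mex is bumped at most once per distinct element).
def pvMexWhile (reachable : PySem.Set Int) (mex : Int) : Nat → Int
  | 0 => mex
  | fuel + 1 =>
    if PySem.Set.contains reachable mex then pvMexWhile reachable (mex + 1) fuel else mex

-- body of compute_grundy's 'for h in range(2, max_h + 1)' loop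
def pvGrundyStep (G : List Int) (h : Int) : List Int :=
  let low := PySem.Int.floordiv (h + 1) 2
  let high := h - 1
  let reachable := (PySem.List.pyRange low (high + 1) 1).foldl
      (fun r j => PySem.Set.add r (PySem.List.pyGetD G j 0)) PySem.Set.empty
  let mex := pvMexWhile reachable 0 (reachable.length + 1)
  PySem.List.pySetD G h mex

def pvComputeGrundy (max_h : Int) : List Int :=
  (PySem.List.pyRange 2 (max_h + 1) 1).foldl pvGrundyStep
    (List.replicate (max_h + 1).toNat (0 : Int))

def count_p_positions_two_heaps (max_h : Int) : Int :=
  let G := pvComputeGrundy max_h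
  (PySem.List.pyRange 0 (max_h + 1) 1).foldl (fun count h1 =>
    (PySem.List.pyRange 0 (max_h + 1) 1).foldl (fun count h2 =>
      if PySem.Int.bxor (PySem.List.pyGetD G h1 0) (PySem.List.pyGetD G h2 0) = 0
      then count + 1 else count) count) 0

-- ===== PORT B =====
-- Source B's inner 'while x % 2 == 1: x //= 2' followed by 'g = x // 2';
-- Nat recursion is exact for x >= 0, the only values it receives (h ranges over 0..max_h).
def pvStrip (x : Nat) : Nat :=
  if x % 2 = 1 then pvStrip (x / 2) else x / 2
decreasing_by omega

def count_p_positions_two_heaps_alt (max_h : Int) : Int :=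
  let freq : PySem.Dict Int Int := (PySem.List.pyRange 0 (max_h + 1) 1).foldl
    (fun d h =>
      let g : Int := (pvStrip h.toNat : Nat)
      PySem.Dict.insert d g (PySem.Dict.getD d g 0 + 1))
    PySem.Dict.empty
  ((PySem.Dict.values freq).map (fun c => c * c)).sum

-- ===== PRECONDITION & SPEC =====
def Spec_count_p_positions_two_heaps (max_h : Int) (out : Int) : Prop := out = count_p_positions_two_heaps_alt max_h
instance (max_h : Int) (out : Int) : Decidable (Spec_count_p_positions_two_heaps max_h out) := by unfold Spec_count_p_positions_two_heaps; infer_instance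

-- ===== CLAIM (what is proved, stated in full; the proofs are below) =====
def Claim_equal_count_p_positions_two_heaps : Prop := ∀ (max_h : Int), Dom_count_p_positions_two_heaps max_h → Spec_count_p_positions_two_heaps max_h (count_p_positions_two_heaps max_h)

-- ===== LEMMAS AND PROOFS =====

def pvG (N b : Nat) : List Int :=
  (List.range N).map (fun j => if j < b then ((pvStrip j : Nat) : Int) else 0)

theorem pvStrip_even (k : Nat) : pvStrip (2 * k) = k := by
  unfold pvStrip; simp [Nat.mul_mod_right]

theorem pvStrip_odd (k : Nat) : pvStrip (2 * k + 1) = pvStrip k := by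
  have h : (2 * k + 1) % 2 = 1 := by omega
  rw [pvStrip, if_pos h]; congr 1; omega

theorem pvStrip_le (x : Nat) : 2 * pvStrip x ≤ x := by
  fun_induction pvStrip with
  | case1 x h ih => omega
  | case2 x h => omega

theorem pvWindow_perm (k : Nat) (hk : 1 ≤ k) :
    ((List.range' k k).map pvStrip).Perm (List.range k) := by
  induction k, hk using Nat.le_induction with
  | base =>
      have h1 : pvStrip 1 = 0 := by
        have h := pvStrip_odd 0
        simpa [pvStrip_even 0] using h
      simp [List.range'_succ, List.range_succ, h1]
  | succ k hk ih =>
      obtain ⟨m, rfl⟩ : ∃ m, k = m + 1 := ⟨k-1, by omega⟩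
      have hsplit : List.range' (m+2) (m+2) = List.range' (m+2) m ++ List.range' (2*(m+1)) 2 := by
        have h := List.range'_append (s := m+2) (m := m) (n := 2) (step := 1)
        simp only [Nat.one_mul] at h
        rw [show (m+2) + m = 2*(m+1) by omega] at h
        rw [show m + 2 = m + (1+1) from rfl] at h ⊢
        rw [← h]
      have hcons : List.range' (m+1) (m+1) = (m+1) :: List.range' (m+2) m := by
        rw [List.range'_succ]
      set w := (List.range' (m+2) m).map pvStrip with hw
      have ihw : (pvStrip (m+1) :: w).Perm (List.range (m+1)) := by
        rw [hw, ← List.map_cons, ← hcons]; exact ih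
      rw [hsplit]
      have h2 : List.range' (2*(m+1)) 2 = [2*(m+1), 2*(m+1)+1] := by simp [List.range'_succ]
      rw [h2, List.map_append]
      simp only [List.map_cons, List.map_nil, pvStrip_even, pvStrip_odd]
      have p1 : (w ++ [m+1, pvStrip (m+1)]).Perm ((pvStrip (m+1) :: w) ++ [m+1]) := by
        have he : w ++ [m+1, pvStrip (m+1)] = (w ++ [m+1]) ++ [pvStrip (m+1)] := by simp
        rw [he]
        exact List.perm_append_comm.trans (by simp)
      have p2 : ((pvStrip (m+1) :: w) ++ [m+1]).Perm (List.range (m+2)) := by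
        rw [List.range_succ]
        exact ihw.append_right _
      exact p1.trans p2

theorem pvMexWhile_aux (r : PySem.Set Int) (t : Nat)
    (ha : ∀ m : Nat, m < t → ((m : Int)) ∈ r) (hb : ((t : Int)) ∉ r) :
    ∀ (fuel s : Nat), s ≤ t → t - s < fuel → pvMexWhile r (s : Int) fuel = t := by
  intro fuel
  induction fuel with
  | zero => omega
  | succ f ih =>
      intro s hs hlt
      rw [pvMexWhile]
      by_cases h : s = t
      · subst h
        rw [if_neg (by simp [hb])]
      · have hst : s < t := by omega
        rw [if_pos (by simp; exact ha s hst)]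
        have hc : ((s : Int)) + 1 = ((s + 1 : Nat) : Int) := by push_cast; ring
        rw [hc]
        exact ih (s + 1) (by omega) (by omega)

theorem pvNat_le_length (r : PySem.Set Int) (t : Nat)
    (ha : ∀ m : Nat, m < t → ((m : Int)) ∈ r) : t ≤ r.length := by
  have hinj : Function.Injective (fun m : Nat => (m : Int)) := fun a b hab => by simpa using hab
  have hnd1 : ((List.range t).map (fun m : Nat => (m : Int))).Nodup :=
    List.Nodup.map hinj List.nodup_range
  have hsubset : ((List.range t).map (fun m : Nat => (m : Int))) ⊆ r := by
    intro x hx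
    obtain ⟨m, hm, rfl⟩ := List.mem_map.mp hx
    exact ha m (List.mem_range.mp hm)
  have hsub := List.Nodup.subperm hnd1 hsubset
  simpa using hsub.length_le

theorem pvMexWhile_eq (r : PySem.Set Int) (t : Nat)
    (ha : ∀ m : Nat, m < t → ((m : Int)) ∈ r) (hb : ((t : Int)) ∉ r) :
    pvMexWhile r 0 (r.length + 1) = t := by
  have h := pvMexWhile_aux r t ha hb (r.length + 1) 0 (by omega)
    (by have := pvNat_le_length r t ha; omega)
  simpa using h

theorem pvStep (N b : Nat) (hb2 : 2 ≤ b) (hbN : b < N) :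
    pvGrundyStep (pvG N b) (b : Int) = pvG N (b + 1) := by
  have hlo : PySem.Int.floordiv ((b : Int) + 1) 2 = (((b+1)/2 : Nat) : Int) := by
    rw [show ((b : Int) + 1) = (((b+1 : Nat)) : Int) by push_cast; ring]
    exact_mod_cast PySem.Int.floordiv_natCast (b+1) 2
  set lo := (b+1)/2 with hlodef
  set W : List Nat := (List.range (b - lo)).map (fun k => pvStrip (lo + k)) with hWdef
  -- reduce the reachable set to Set.ofList of the window's strip values
  have hreach : (PySem.List.pyRange (PySem.Int.floordiv ((b:Int) + 1) 2) ((b:Int) - 1 + 1) 1).foldl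
      (fun r j => PySem.Set.add r (PySem.List.pyGetD (pvG N b) j 0)) PySem.Set.empty
      = PySem.Set.ofList (List.map (fun m : Nat => (m : Int)) W) := by
    rw [← PySem.Set.update_map_eq_foldl_add, PySem.Set.update_empty]
    congr 1
    rw [hlo, show ((b:Int) - 1 + 1) = ((b:Nat):Int) by ring, PySem.List.pyRange_one]
    rw [show (((b:Nat):Int) - ((lo:Nat):Int)).toNat = b - lo by omega]
    rw [hWdef, List.map_map, List.map_map]
    apply List.map_congr_left
    intro k hk
    have hk' : k < b - lo := List.mem_range.mp hk
    have h1 : ((lo : Int)) + (k : Int) = ((lo + k : Nat) : Int) := by push_cast; ring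
    simp only [Function.comp]
    rw [h1, PySem.List.pyGetD_natCast, pvG,
        PySem.List.getD_map_range _ _ _ _ (by omega : lo + k < N), if_pos (by omega : lo + k < b)]
  have hmemW : ∀ m : Nat, ((m:Int)) ∈ PySem.Set.ofList (List.map (fun m : Nat => (m : Int)) W) ↔ m ∈ W := by
    intro m
    rw [PySem.Set.mem_ofList, List.mem_map]
    constructor
    · rintro ⟨x, hx, he⟩
      have : x = m := by exact_mod_cast he
      exact this ▸ hx
    · intro hm; exact ⟨m, hm, rfl⟩
  -- window facts, by parity of b
  have hWr : W = (List.range' lo (b - lo)).map pvStrip := by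
    rw [hWdef, List.range'_eq_map_range, List.map_map]; rfl
  have hfacts : (∀ m : Nat, m < pvStrip b → m ∈ W) ∧ pvStrip b ∉ W := by
    rcases Nat.even_or_odd b with ⟨k, hkb⟩ | ⟨k, hkb⟩
    · -- b = 2k: window [k, 2k-1], strip-values a permutation of range k, pvStrip b = k
      have hk1 : 1 ≤ k := by omega
      have hlok : lo = k := by omega
      have hblo : b - lo = k := by omega
      have hperm : W.Perm (List.range k) := by
        rw [hWr, hlok, show b - k = k by omega]; exact pvWindow_perm k hk1
      have hstripb : pvStrip b = k := by
        rw [show b = 2 * k by omega, pvStrip_even]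
      constructor
      · intro m hm
        rw [hperm.mem_iff, List.mem_range]; omega
      · rw [hperm.mem_iff, List.mem_range, hstripb]; omega
    · -- b = 2k+1: window [k+1, 2k], values ++ [pvStrip k] a permutation of range (k+1)
      have hk1 : 1 ≤ k := by omega
      have hlok : lo = k + 1 := by omega
      have hblo : b - lo = k := by omega
      have hstripb : pvStrip b = pvStrip k := by
        rw [show b = 2 * k + 1 by omega, pvStrip_odd]
      have hsplit : List.range' (k+1) (k+1) = List.range' (k+1) k ++ [2*k+1] := by
        have h := List.range'_concat (step := 1) (s := k+1) (n := k)
        rw [h]; congr 1; simp; omega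
      have hperm : (W ++ [pvStrip k]).Perm (List.range (k+1)) := by
        have hp := pvWindow_perm (k+1) (by omega)
        rw [hsplit, List.map_append] at hp
        rw [hWr, hlok, show b - (k+1) = k by omega]
        simpa [pvStrip_odd] using hp
      have hnd : (W ++ [pvStrip k]).Nodup := hperm.nodup_iff.mpr (List.nodup_range)
      have hnotin : pvStrip k ∉ W := by
        rcases List.nodup_append.mp hnd with ⟨-, -, hdisj⟩
        intro hc
        exact hdisj _ hc (pvStrip k) (by simp) rfl
      have hsk : pvStrip k ≤ k := by have := pvStrip_le k; omega
      constructor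
      · intro m hm
        rw [hstripb] at hm
        have hmr : m ∈ List.range (k+1) := by rw [List.mem_range]; omega
        have := hperm.mem_iff.mpr hmr
        rcases List.mem_append.mp this with h | h
        · exact h
        · simp at h; omega
      · rw [hstripb]; exact hnotin
  obtain ⟨haW, hbW⟩ := hfacts
  -- run the mex loop
  have hmex : pvMexWhile (PySem.Set.ofList (List.map (fun m : Nat => (m : Int)) W)) 0
      ((PySem.Set.ofList (List.map (fun m : Nat => (m : Int)) W)).length + 1) = ((pvStrip b : Nat) : Int) :=
    pvMexWhile_eq _ (pvStrip b)
      (fun m hm => (hmemW m).mpr (haW m hm))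
      (fun hc => hbW ((hmemW (pvStrip b)).mp hc))
  -- assemble
  show PySem.List.pySetD (pvG N b) (b:Int) _ = _
  
  rw [hreach, hmex, PySem.List.pySetD_natCast]
  apply List.ext_getElem
  · simp [pvG]
  · intro j h1 h2
    simp only [pvG, List.getElem_set, List.getElem_map, List.getElem_range]
    have hjN : j < N := by simpa [pvG] using h1
    by_cases hjb : b = j
    · subst hjb; simp
    · rw [if_neg hjb]
      by_cases hj : j < b
      · rw [if_pos hj, if_pos (by omega)]
      · rw [if_neg hj, if_neg (by omega)]

theorem pvStrip_zero : pvStrip 0 = 0 := by simpa using pvStrip_even 0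

theorem pvStrip_one : pvStrip 1 = 0 := by simpa [pvStrip_zero] using pvStrip_odd 0

theorem pvG_init (N : Nat) : List.replicate N (0:Int) = pvG N 2 := by
  apply List.ext_getElem
  · simp [pvG]
  · intro j h1 h2
    simp only [pvG, List.getElem_replicate, List.getElem_map, List.getElem_range]
    by_cases hj : j < 2
    · rw [if_pos hj]
      interval_cases j
      · simp [pvStrip_zero]
      · simp [pvStrip_one]
    · rw [if_neg hj]

theorem pvG_stable (N b b' : Nat) (h : N ≤ b) (h' : N ≤ b') : pvG N b = pvG N b' := by
  apply List.map_congr_left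
  intro j hj
  have := List.mem_range.mp hj
  rw [if_pos (by omega), if_pos (by omega)]

theorem pvFold (M : Nat) : ∀ c : Nat, 2 + c ≤ M + 1 →
    (PySem.List.pyRange 2 ((2 + c : Nat) : Int) 1).foldl pvGrundyStep (pvG (M+1) 2)
      = pvG (M+1) (2 + c) := by
  intro c
  induction c with
  | zero =>
      intro _
      rw [PySem.List.pyRange_one_eq_nil (by norm_num)]
      simp
  | succ c ih =>
      intro hc
      have h1 : ((2 + (c+1) : Nat) : Int) = ((2 + c : Nat) : Int) + 1 := by push_cast; ring
      rw [h1, PySem.List.pyRange_one_succ_right (by exact_mod_cast Nat.le_add_right 2 c),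
          List.foldl_append, ih (by omega)]
      simp only [List.foldl_cons, List.foldl_nil]
      have h2 := pvStep (M+1) (2+c) (by omega) (by omega)
      rw [h2, show 2 + c + 1 = 2 + (c+1) from rfl]

theorem pvGrundy_eq (M : Nat) : pvComputeGrundy (M : Int) = pvG (M+1) (M+1) := by
  unfold pvComputeGrundy
  rw [show ((M : Int) + 1) = ((M+1 : Nat) : Int) by push_cast; ring]
  rw [show (((M+1 : Nat) : Int)).toNat = M + 1 by omega]
  rw [pvG_init (M+1)]
  rcases Nat.lt_or_ge M 2 with hM | hM
  · rw [PySem.List.pyRange_one_eq_nil (by exact_mod_cast by omega : ((M+1:Nat):Int) ≤ 2)]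
    simp only [List.foldl_nil]
    exact pvG_stable _ _ _ (by omega) (by omega)
  · have := pvFold M (M-1) (by omega)
    rw [show (2 + (M-1)) = M + 1 by omega] at this
    exact this

theorem pvSum_count_sq (l : List Int) :
    (l.map (fun v => (l.count v : Int))).sum
      = ((PySem.Set.ofList l).map (fun v => ((l.count v : Int)) * (l.count v))).sum := by
  have lhs : (l.map (fun v => (l.count v : Int))).sum
      = ∑ m ∈ l.toFinset, (l.count m) • ((l.count m : Int)) := by
    have h := Finset.sum_multiset_map_count (l : Multiset Int) (fun v => (l.count v : Int))
    simpa using h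
  have rhs : ((PySem.Set.ofList l).map (fun v => ((l.count v : Int)) * (l.count v))).sum
      = ∑ m ∈ l.toFinset, ((l.count m : Int)) * (l.count m) := by
    have hnd : (PySem.Set.ofList l).Nodup := PySem.Set.nodup_ofList l
    have hfs : (PySem.Set.ofList l).toFinset = l.toFinset := by
      ext x; simp [List.mem_toFinset, PySem.Set.mem_ofList]
    rw [← List.sum_toFinset _ hnd, hfs]
  rw [lhs, rhs]
  apply Finset.sum_congr rfl
  intro m _
  simp

theorem pvMain (M : Nat) :
    count_p_positions_two_heaps (M : Int) = count_p_positions_two_heaps_alt (M : Int) := by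
  have hr : PySem.List.pyRange 0 ((M : Int) + 1) 1
      = (List.range (M+1)).map (fun k : Nat => (k : Int)) := by
    rw [show ((M : Int) + 1) = ((M+1 : Nat) : Int) by push_cast; ring]
    exact PySem.List.pyRange_zero_nat (M+1)
  -- the computed Grundy list, as casts of pvStrip
  have hG : pvComputeGrundy (M : Int) = (List.range (M+1)).map (fun j => ((pvStrip j : Nat) : Int)) := by
    rw [pvGrundy_eq]
    exact List.map_congr_left (fun j hj => if_pos (List.mem_range.mp hj))
  set sl : List Nat := (List.range (M+1)).map pvStrip with hsl
  set glZ : List Int := (List.range (M+1)).map (fun j => ((pvStrip j : Nat) : Int)) with hglZ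
  have hglZ2 : glZ = sl.map (fun m : Nat => (m : Int)) := by
    rw [hglZ, hsl, List.map_map]; rfl
  -- A-side
  have hA : count_p_positions_two_heaps (M : Int)
      = (glZ.map (fun v => (glZ.count v : Int))).sum := by
    show (PySem.List.pyRange 0 ((M:Int) + 1) 1).foldl _ 0 = _
    rw [hr, hG]
    rw [List.foldl_map]
    have hbody : ∀ acc : Int, ∀ j1 ∈ List.range (M+1),
        (List.map (fun k : Nat => (k : Int)) (List.range (M+1))).foldl
          (fun count h2 =>
            if PySem.Int.bxor (PySem.List.pyGetD glZ (j1 : Int) 0) (PySem.List.pyGetD glZ h2 0) = 0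
            then count + 1 else count) acc
        = acc + (glZ.count ((pvStrip j1 : Nat) : Int) : Int) := by
      intro acc j1 hj1
      have hj1' : j1 < M + 1 := List.mem_range.mp hj1
      rw [List.foldl_map]
      have hget : ∀ j : Nat, j < M + 1 → PySem.List.pyGetD glZ (j : Int) 0 = ((pvStrip j : Nat) : Int) := by
        intro j hj
        rw [PySem.List.pyGetD_natCast, hglZ, PySem.List.getD_map_range _ _ _ _ hj]
      have hcong : ∀ c : Int, ∀ j2 ∈ List.range (M+1),
          (if PySem.Int.bxor (PySem.List.pyGetD glZ (j1 : Int) 0) (PySem.List.pyGetD glZ (j2 : Int) 0) = 0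
           then c + 1 else c)
          = (if ((pvStrip j2 : Nat) : Int) = ((pvStrip j1 : Nat) : Int) then c + 1 else c) := by
        intro c j2 hj2
        rw [hget j1 hj1', hget j2 (List.mem_range.mp hj2), PySem.Int.bxor_natCast]
        by_cases hss : pvStrip j2 = pvStrip j1
        · rw [if_pos (by rw [hss]; simp), if_pos (by exact_mod_cast hss)]
        · rw [if_neg, if_neg (by intro h; exact hss (by exact_mod_cast h))]
          intro h
          have h2 : pvStrip j1 ^^^ pvStrip j2 = 0 := by exact_mod_cast h
          exact hss (Nat.xor_eq_zero_iff.mp h2).symm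
      rw [PySem.List.foldl_congr_mem _ _ _ _ hcong]
      rw [PySem.List.foldl_ite_add_one]
      congr 2
      rw [hglZ2, hsl]
      rw [List.count_map_of_injective _ _ (fun a b hab => by simpa using hab)]
      rw [List.count_eq_countP, List.countP_map]
      apply List.countP_congr
      intro j2 _
      simp only [Function.comp_apply, decide_eq_true_eq, beq_iff_eq, Nat.cast_inj]
    rw [PySem.List.foldl_congr_mem _ _ _ _ hbody]
    rw [PySem.List.foldl_add (g := fun j1 : Nat => (glZ.count ((pvStrip j1 : Nat) : Int) : Int))]
    rw [zero_add, hglZ2, hsl, List.map_map]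
    rw [List.map_map]
    rfl
  -- B-side
  have hB : count_p_positions_two_heaps_alt (M : Int)
      = ((PySem.Set.ofList glZ).map (fun v => ((glZ.count v : Int)) * (glZ.count v))).sum := by
    show ((PySem.Dict.values ((PySem.List.pyRange 0 ((M:Int) + 1) 1).foldl _ PySem.Dict.empty)).map _).sum = _
    rw [hr, List.foldl_map]
    have hstep : (List.range (M+1)).foldl
        (fun d (j : Nat) =>
          (fun (d : PySem.Dict Int Int) (h : Int) =>
            let g : Int := (pvStrip h.toNat : Nat)
            PySem.Dict.insert d g (PySem.Dict.getD d g 0 + 1)) d ((j : Nat) : Int))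
        PySem.Dict.empty
        = (List.range (M+1)).foldl
            (fun d (j : Nat) =>
              PySem.Dict.insert d ((pvStrip j : Nat) : Int)
                (PySem.Dict.getD d ((pvStrip j : Nat) : Int) 0 + 1)) PySem.Dict.empty := by
      apply PySem.List.foldl_congr_mem
      intro d j hj
      simp only [Int.toNat_natCast]
    rw [hstep]
    rw [← List.foldl_map (f := fun j : Nat => ((pvStrip j : Nat) : Int))
         (g := fun (d : PySem.Dict Int Int) (x : Int) =>
            PySem.Dict.insert d x (PySem.Dict.getD d x 0 + 1))]
    rw [show (List.range (M+1)).map (fun j : Nat => ((pvStrip j : Nat) : Int)) = glZ from rfl]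
    rw [PySem.Dict.foldl_insert_getD_add_one_eq_counter]
    unfold PySem.Dict.values
    rw [PySem.Dict.items_counter, List.map_map, List.map_map]
    rfl
  rw [hA, hB, pvSum_count_sq]

-- ===== VERDICT (by name: the statement is the Claim_ definition above) =====
theorem count_p_positions_two_heaps_spec : Claim_equal_count_p_positions_two_heaps := by
  intro max_h _
  unfold Spec_count_p_positions_two_heaps
  by_cases hpos : 0 ≤ max_h
  · obtain ⟨M, rfl⟩ : ∃ M : Nat, max_h = (M : Int) := ⟨max_h.toNat, by omega⟩
    exact pvMain M
  · show count_p_positions_two_heaps max_h = count_p_positions_two_heaps_alt max_h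
    unfold count_p_positions_two_heaps count_p_positions_two_heaps_alt
    rw [PySem.List.pyRange_one_eq_nil (by omega : max_h + 1 ≤ 0)]
    simp [PySem.Dict.values, PySem.Dict.empty]
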